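-- pv_equiv track=rewrite | github.com/paulkarayan/melodic-interpreter | core/abc_utils.py | parse_abc
-- ===== SOURCE A (Python) =====
-- from typing import Tuple, List
--
-- def parse_abc(abc_string: str) -> Tuple[str, str]:
--     """
--     Parse ABC into headers and body
--
--     Args:
--         abc_string: Full ABC notation string
--
--     Returns:
--         (headers_string, body_string)
--     """
--     lines = abc_string.split('\n')
--     header_end = next((i for i, l in enumerate(lines) if l.startswith('K:')), -1)
--
--     if header_end == -1:
--         raise ValueError("Invalid ABC notation - no K: header found")
--
--     headers = '\n'.join(lines[:header_end + 1])
--     body = '\n'.join(lines[header_end + 1:])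
--
--     return headers, body
-- ===== SOURCE B (Python) =====
-- from typing import Tuple
--
--
-- def parse_abc(abc_string: str) -> Tuple[str, str]:
--     """
--     Parse ABC into headers and body.
--
--     Single pass: peel one line at a time with str.partition instead of
--     splitting the whole string into a line list; stop at the first K: line.
--     """
--     prefix = []
--     rest = abc_string
--     while True:
--         head, sep, tail = rest.partition('\n')
--         prefix.append(head)
--         if head.startswith('K:'):
--             return '\n'.join(prefix), tail
--         if not sep:
--             raise ValueError("Invalid ABC notation - no K: header found")
--         rest = tail
-- ===== Notes on version B (the rewrite author's own statement) =====
-- stated objective: alternative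
-- what changed: Replaces A's split-the-whole-string-into-a-line-list, enumerate/index search and join-of-two-slices by a single streaming pass that peels one line at a time with str.partition and stops at the first key-signature header line.
import Mathlib
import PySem

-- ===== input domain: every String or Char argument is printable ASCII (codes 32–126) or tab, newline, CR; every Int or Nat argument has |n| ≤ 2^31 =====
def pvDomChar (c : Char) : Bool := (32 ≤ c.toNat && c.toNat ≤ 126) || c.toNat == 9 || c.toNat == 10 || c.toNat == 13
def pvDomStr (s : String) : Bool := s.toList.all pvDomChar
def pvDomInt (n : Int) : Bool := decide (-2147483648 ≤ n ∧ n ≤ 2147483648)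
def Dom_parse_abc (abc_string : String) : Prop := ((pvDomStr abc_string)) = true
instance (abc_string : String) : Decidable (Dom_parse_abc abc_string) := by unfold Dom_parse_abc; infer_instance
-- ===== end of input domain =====

-- B replaces A's split-into-line-list / index-search / join-of-slices by a single
-- streaming pass that peels one line at a time with partition('\n') and stops at the
-- first 'K:' line (objective: alternative decomposition).

-- ===== PORT A =====
-- next((i for i, l in enumerate(lines) if l.startswith('K:')), -1)
def pvFindK : List (Int × List Char) → Int
  | [] => -1
  | (i, l) :: rest => if PySem.Chars.startswith l ['K', ':'] then i else pvFindK rest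

def parse_abc (abc_string : String) : String × String :=
  let lines := PySem.Chars.splitOn abc_string.toList ['\n']
  let header_end := pvFindK (PySem.List.enumerate lines 0)
  if header_end = -1 then ("", "")   -- raise ValueError: excluded by Pre_parse_abc
  else
    let headers := PySem.Chars.join ['\n'] (PySem.List.slice lines none (some (header_end + 1)))
    let body := PySem.Chars.join ['\n'] (PySem.List.slice lines (some (header_end + 1)) none)
    (String.ofList headers, String.ofList body)

-- ===== PORT B =====
-- rest.partition('\n') specialized to the one-char separator it is called with:
-- (head, some tail) when a '\n' is found (sep truthy), (head, none) otherwise.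
-- Hand port, exact for this use.
def pvPartitionNl : List Char → List Char × Option (List Char)
  | [] => ([], none)
  | c :: cs =>
      if c = '\n' then ([], some cs)
      else
        let p := pvPartitionNl cs
        (c :: p.1, p.2)

-- termination fact for the loop below (cited in decreasing_by)
theorem pvPartitionNl_some_lt : ∀ (cs h t : List Char), pvPartitionNl cs = (h, some t) → t.length < cs.length := by
  intro cs
  induction cs with
  | nil => intro h t hp; simp [pvPartitionNl] at hp
  | cons c cs ih =>
    intro h t hp
    by_cases hc : c = '\n'
    · simp [pvPartitionNl, hc] at hp
      simp [hp.2]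
    · simp [pvPartitionNl, hc] at hp
      rcases hq : pvPartitionNl cs with ⟨h', o⟩
      rw [hq] at hp
      cases o with
      | none => simp at hp
      | some t' =>
        simp at hp
        have := ih h' t' hq
        simp [← hp.2]; omega

-- the while-loop of B: pre is the 'prefix' list of completed lines
def pvParseLoop (pre : List (List Char)) (rest : List Char) : List Char × List Char :=
  match hp : pvPartitionNl rest with
  | (head, none) =>
      if PySem.Chars.startswith head ['K', ':'] then
        (PySem.Chars.join ['\n'] (pre ++ [head]), [])
      else ([], [])   -- raise ValueError: excluded by Pre_parse_abc
  | (head, some tail) =>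
      if PySem.Chars.startswith head ['K', ':'] then
        (PySem.Chars.join ['\n'] (pre ++ [head]), tail)
      else pvParseLoop (pre ++ [head]) tail
termination_by rest.length
decreasing_by exact pvPartitionNl_some_lt rest head tail hp

def parse_abc_alt (abc_string : String) : String × String :=
  let r := pvParseLoop [] abc_string.toList
  (String.ofList r.1, String.ofList r.2)

-- ===== PRECONDITION & SPEC =====
-- Pre_: some line of the input starts with 'K:' — exactly the inputs on which A
-- returns (on all others A raises ValueError).
def Pre_parse_abc (abc_string : String) : Prop :=
  ∃ l ∈ PySem.Chars.splitOn abc_string.toList ['\n'], PySem.Chars.startswith l ['K', ':'] = true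
instance (abc_string : String) : Decidable (Pre_parse_abc abc_string) := by unfold Pre_parse_abc; infer_instance

def pvWitness_parse_abc : String := "X:1\nK:D\nabc def"

def Spec_parse_abc (abc_string : String) (out : String × String) : Prop := out = parse_abc_alt abc_string
instance (abc_string : String) (out : String × String) : Decidable (Spec_parse_abc abc_string out) := by unfold Spec_parse_abc; infer_instance

-- ===== CLAIM (what is proved, stated in full; the proofs are below) =====
def Claim_equal_parse_abc : Prop := ∀ (abc_string : String), Dom_parse_abc abc_string → Pre_parse_abc abc_string → Spec_parse_abc abc_string (parse_abc abc_string)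

-- ===== LEMMAS AND PROOFS =====

-- proof-only helpers: the list of lines of cs split at '\n' (always nonempty), …
def pvLines : List Char → List (List Char)
  | [] => [[]]
  | c :: cs =>
      if c = '\n' then [] :: pvLines cs
      else
        match pvLines cs with
        | [] => [[c]]          -- unreachable: pvLines is never []
        | h :: r => (c :: h) :: r

-- … prepend p to the first element, …
def pvConsHead (p : List Char) : List (List Char) → List (List Char)
  | [] => [p]
  | h :: r => (p ++ h) :: r

-- … and the common functional spec on the line list: (joined header lines, joined body)
def pvF : List (List Char) → List Char × List Char
  | [] => ([], [])             -- unreachable under Pre_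
  | l :: r =>
      if PySem.Chars.startswith l ['K', ':'] then (l, PySem.Chars.join ['\n'] r)
      else
        let p := pvF r
        (l ++ '\n' :: p.1, p.2)

theorem pvLines_ne_nil (cs : List Char) : pvLines cs ≠ [] := by
  cases cs with
  | nil => simp [pvLines]
  | cons c cs =>
    simp only [pvLines]
    split
    · simp
    · split <;> simp

theorem pvJoin_pvLines (cs : List Char) : PySem.Chars.join ['\n'] (pvLines cs) = cs := by
  induction cs with
  | nil => simp [pvLines, PySem.Chars.join_singleton]
  | cons c cs ih =>
    by_cases hc : c = '\n'
    · rcases hl : pvLines cs with _ | ⟨h, r⟩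
      · exact absurd hl (pvLines_ne_nil cs)
      · simp only [pvLines, hc, if_true]
        rw [hl, PySem.Chars.join_cons_cons]
        rw [hl] at ih; rw [ih]; simp
    · rcases hl : pvLines cs with _ | ⟨h, r⟩
      · exact absurd hl (pvLines_ne_nil cs)
      · simp only [pvLines, hc, if_false, hl]
        rw [hl] at ih
        cases r with
        | nil => rw [PySem.Chars.join_singleton] at ih ⊢; simp [ih]
        | cons q r' =>
          rw [PySem.Chars.join_cons_cons] at ih ⊢
          simp [ih]

theorem pvGo_spec : ∀ (fuel : Nat) (l cur : List Char) (acc : List (List Char)), l.length < fuel →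
    PySem.Chars.splitOn.go ['\n'] fuel l cur acc = acc.reverse ++ pvConsHead cur.reverse (pvLines l) := by
  intro fuel
  induction fuel with
  | zero => intro l cur acc h; omega
  | succ fuel ih =>
    intro l cur acc h
    cases l with
    | nil =>
      simp [PySem.Chars.splitOn.go, pvLines, pvConsHead]
    | cons c rest =>
      by_cases hc : c = '\n'
      · have hpre : List.isPrefixOf ['\n'] (c :: rest) = true := by simp [List.isPrefixOf, hc]
        rw [PySem.Chars.splitOn.go]
        simp only [hpre, if_true]
        have hd1 : List.drop (List.length ['\n']) (c :: rest) = rest := by simp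
        rw [hd1]
        rw [ih rest [] (cur.reverse :: acc) (by simp at h; omega)]
        rcases hl : pvLines rest with _ | ⟨hd, r⟩
        · exact absurd hl (pvLines_ne_nil rest)
        · simp [pvLines, hc, hl, pvConsHead]
      · have hpre : List.isPrefixOf ['\n'] (c :: rest) = false := by
          simp [List.isPrefixOf]
          exact fun he => absurd he.symm hc
        rw [PySem.Chars.splitOn.go]
        simp only [hpre, Bool.false_eq_true, if_false]
        rw [ih rest (c :: cur) acc (by simp at h; omega)]
        rcases hl : pvLines rest with _ | ⟨hd, r⟩
        · exact absurd hl (pvLines_ne_nil rest)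
        · simp [pvLines, hc, hl, pvConsHead]

theorem pvSplitOn_eq_pvLines (cs : List Char) : PySem.Chars.splitOn cs ['\n'] = pvLines cs := by
  rw [PySem.Chars.splitOn, pvGo_spec cs.length.succ cs [] [] (by omega)]
  rcases hl : pvLines cs with _ | ⟨h, r⟩
  · exact absurd hl (pvLines_ne_nil cs)
  · simp [pvConsHead]

theorem pvPartition_pvLines (cs : List Char) :
    (∀ h, pvPartitionNl cs = (h, none) → pvLines cs = [h]) ∧
    (∀ h t, pvPartitionNl cs = (h, some t) → pvLines cs = h :: pvLines t) := by
  induction cs with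
  | nil =>
    constructor
    · intro h hp; simp [pvPartitionNl] at hp; simp [pvLines, hp]
    · intro h t hp; simp [pvPartitionNl] at hp
  | cons c cs ih =>
    by_cases hc : c = '\n'
    · constructor
      · intro h hp; simp [pvPartitionNl, hc] at hp
      · intro h t hp
        simp [pvPartitionNl, hc] at hp
        simp [pvLines, hc, hp.1, hp.2]
    · constructor
      · intro h hp
        simp only [pvPartitionNl, if_neg hc] at hp
        rcases hq : pvPartitionNl cs with ⟨h', o⟩
        rw [hq] at hp
        cases o with
        | some t' => simp at hp
        | none =>
          simp at hp
          have := ih.1 h' hq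
          simp only [pvLines, if_neg hc, this]
          simp [hp]
      · intro h t hp
        simp only [pvPartitionNl, if_neg hc] at hp
        rcases hq : pvPartitionNl cs with ⟨h', o⟩
        rw [hq] at hp
        cases o with
        | none => simp at hp
        | some t' =>
          simp at hp
          have h2 := ih.2 h' t' hq
          rcases hl : pvLines cs with _ | ⟨hd, r⟩
          · exact absurd hl (pvLines_ne_nil cs)
          · rw [hl] at h2
            simp only [pvLines, if_neg hc, hl]
            rw [← hp.1, ← hp.2]
            simp at h2
            simp [h2]

theorem pvFindK_shift (ls : List (List Char)) : ∀ (n : Int),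
    (pvFindK (PySem.List.enumerate ls n) = -1 ∧ pvFindK (PySem.List.enumerate ls 0) = -1) ∨
    (0 ≤ pvFindK (PySem.List.enumerate ls 0) ∧
      pvFindK (PySem.List.enumerate ls n) = n + pvFindK (PySem.List.enumerate ls 0)) := by
  induction ls with
  | nil => intro n; left; simp [PySem.List.enumerate_nil, pvFindK]
  | cons l r ih =>
    intro n
    by_cases hs : PySem.Chars.startswith l ['K', ':']
    · right
      simp [PySem.List.enumerate_cons, pvFindK, hs]
    · rw [PySem.List.enumerate_cons, PySem.List.enumerate_cons]
      simp only [pvFindK, if_neg hs, zero_add]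
      rcases ih (n + 1) with ⟨h1, h0⟩ | ⟨h0, h1⟩
      · left
        constructor
        · exact h1
        · rcases ih 1 with ⟨ha, hb⟩ | ⟨ha, hb⟩
          · exact ha
          · rcases ih (n+1) with ⟨hc, hd⟩ | ⟨hc, hd⟩
            · omega
            · omega
      · right
        rcases ih 1 with ⟨ha, hb⟩ | ⟨ha, hb⟩
        · omega
        · omega

theorem pvFindK_ne_neg_one (ls : List (List Char))
    (h : ∃ l ∈ ls, PySem.Chars.startswith l ['K', ':'] = true) :
    pvFindK (PySem.List.enumerate ls 0) ≠ -1 := by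
  induction ls with
  | nil => simp at h
  | cons l r ih =>
    rw [PySem.List.enumerate_cons]
    by_cases hs : PySem.Chars.startswith l ['K', ':']
    · simp [pvFindK, hs]
    · simp only [pvFindK, if_neg hs, zero_add]
      simp only [List.mem_cons] at h
      rcases h with ⟨x, hx | hx, hsw⟩
      · rw [hx] at hsw; exact absurd hsw (by simpa using hs)
      · have hne := ih ⟨x, hx, hsw⟩
        rcases pvFindK_shift r 1 with ⟨h1, h0⟩ | ⟨h0, h1⟩
        · exact absurd h0 hne
        · omega

theorem pvA_char (ls : List (List Char)) :
    (∃ l ∈ ls, PySem.Chars.startswith l ['K', ':'] = true) →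
    (PySem.Chars.join ['\n'] (PySem.List.slice ls none (some (pvFindK (PySem.List.enumerate ls 0) + 1))),
     PySem.Chars.join ['\n'] (PySem.List.slice ls (some (pvFindK (PySem.List.enumerate ls 0) + 1)) none))
      = pvF ls := by
  induction ls with
  | nil => intro h; simp at h
  | cons l r ih =>
    intro h
    rw [PySem.List.enumerate_cons]
    by_cases hs : PySem.Chars.startswith l ['K', ':']
    · simp only [pvFindK, if_pos hs, zero_add]
      rw [PySem.List.slice_to _ (by omega : (0:Int) ≤ 1), PySem.List.slice_from _ (by omega : (0:Int) ≤ 1)]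
      simp only [Int.toNat_one, List.take_succ_cons, List.take_zero, List.drop_succ_cons, List.drop_zero]
      simp [pvF, hs, PySem.Chars.join_singleton]
    · have hr : ∃ x ∈ r, PySem.Chars.startswith x ['K', ':'] = true := by
        rcases h with ⟨x, hx, hsw⟩
        simp only [List.mem_cons] at hx
        rcases hx with hx | hx
        · rw [hx] at hsw; exact absurd hsw (by simpa using hs)
        · exact ⟨x, hx, hsw⟩
      have hne := pvFindK_ne_neg_one r hr
      have hsh := pvFindK_shift r 1
      rcases hsh with ⟨h1, h0⟩ | ⟨h0, h1⟩
      · exact absurd h0 hne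
      set i := pvFindK (PySem.List.enumerate r 0) with hi
      simp only [pvFindK, if_neg hs, zero_add, h1]
      have hb : (0:Int) ≤ 1 + i + 1 := by omega
      rw [PySem.List.slice_to _ hb, PySem.List.slice_from _ hb]
      have htn : (1 + i + 1).toNat = i.toNat + 2 := by omega
      rw [htn]
      simp only [List.take_succ_cons, List.drop_succ_cons]
      have ih' := ih hr
      rw [PySem.List.slice_to _ (by omega : (0:Int) ≤ i + 1), PySem.List.slice_from _ (by omega : (0:Int) ≤ i + 1)] at ih'
      have htn2 : (i + 1).toNat = i.toNat + 1 := by omega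
      rw [htn2] at ih'
      have hrne : r ≠ [] := by rcases hr with ⟨x, hx, _⟩; exact List.ne_nil_of_mem hx
      rcases hq : List.take (i.toNat + 1) r with _ | ⟨q, qs⟩
      · rcases r with _ | ⟨r0, rr⟩
        · exact absurd rfl hrne
        · simp at hq
      · rw [hq] at ih'
        rw [PySem.Chars.join_cons_cons]
        simp only [pvF, if_neg hs]
        have e1 := congrArg Prod.fst ih'
        have e2 := congrArg Prod.snd ih'
        simp only at e1 e2
        rw [e1, e2]
        simp

theorem pvJoin_merge (pre : List (List Char)) (a b : List Char) :
    PySem.Chars.join ['\n'] (pre ++ [a, b]) = PySem.Chars.join ['\n'] (pre ++ [a ++ '\n' :: b]) := by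
  induction pre with
  | nil =>
    simp only [List.nil_append]
    rw [PySem.Chars.join_cons_cons, PySem.Chars.join_singleton, PySem.Chars.join_singleton]
    simp
  | cons p ps ih =>
    obtain ⟨y, ys, hy⟩ := List.exists_cons_of_ne_nil (show ps ++ [a, b] ≠ [] by simp)
    obtain ⟨z, zs, hz⟩ := List.exists_cons_of_ne_nil (show ps ++ [a ++ '\n' :: b] ≠ [] by simp)
    rw [List.cons_append, hy, PySem.Chars.join_cons_cons, ← hy,
        List.cons_append, hz, PySem.Chars.join_cons_cons, ← hz, ih]

theorem pvB_char (n : Nat) : ∀ (cs : List Char), cs.length ≤ n → ∀ (pre : List (List Char)),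
    (∃ l ∈ pvLines cs, PySem.Chars.startswith l ['K', ':'] = true) →
    pvParseLoop pre cs = (PySem.Chars.join ['\n'] (pre ++ [(pvF (pvLines cs)).1]), (pvF (pvLines cs)).2) := by
  induction n with
  | zero =>
    intro cs hlen pre h
    have hcs : cs = [] := by cases cs <;> simp_all
    subst hcs
    simp only [pvLines] at h ⊢
    rcases h with ⟨x, hx, hsw⟩
    simp at hx
    subst hx
    rw [pvParseLoop]
    rcases hp : pvPartitionNl [] with ⟨h0, o⟩
    simp [pvPartitionNl] at hp
    rcases hp with ⟨hp1, hp2⟩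
    subst hp1; subst hp2
    simp [hsw, pvF, PySem.Chars.join_nil]
  | succ n ih =>
    intro cs hlen pre h
    rw [pvParseLoop]
    rcases hp : pvPartitionNl cs with ⟨head, o⟩
    cases o with
    | none =>
      have hl := (pvPartition_pvLines cs).1 head hp
      rw [hl] at h
      rcases h with ⟨x, hx, hsw⟩
      simp at hx
      subst hx
      simp only [hsw, if_true, hl, pvF, PySem.Chars.join_nil]
    | some tail =>
      have hl := (pvPartition_pvLines cs).2 head tail hp
      by_cases hs : PySem.Chars.startswith head ['K', ':']
      · simp only [hs, if_true, hl, pvF]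
        rw [pvJoin_pvLines tail]
      · have hr : ∃ l ∈ pvLines tail, PySem.Chars.startswith l ['K', ':'] = true := by
          rw [hl] at h
          rcases h with ⟨x, hx, hsw⟩
          simp only [List.mem_cons] at hx
          rcases hx with hx | hx
          · rw [hx] at hsw; exact absurd hsw (by simpa using hs)
          · exact ⟨x, hx, hsw⟩
        have hlt := pvPartitionNl_some_lt cs head tail hp
        have ih' := ih tail (by omega) (pre ++ [head]) hr
        simp only [hs, ih', hl, pvF, Bool.false_eq_true, if_false, Prod.mk.injEq]
        refine ⟨?_, trivial⟩
        rw [List.append_assoc]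
        exact pvJoin_merge pre head (pvF (pvLines tail)).1

-- ===== VERDICT (by name: the statement is the Claim_ definition above) =====
theorem parse_abc_spec : Claim_equal_parse_abc := by
  intro s _hdom hpre
  unfold Spec_parse_abc
  have hex : ∃ l ∈ pvLines s.toList, PySem.Chars.startswith l ['K', ':'] = true := by
    rw [← pvSplitOn_eq_pvLines]; exact hpre
  have hne := pvFindK_ne_neg_one (pvLines s.toList) hex
  have hA := pvA_char (pvLines s.toList) hex
  have hB := pvB_char s.toList.length s.toList le_rfl [] hex
  simp only [parse_abc, parse_abc_alt, pvSplitOn_eq_pvLines, hB]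
  rw [if_neg hne]
  have e1 := congrArg Prod.fst hA
  have e2 := congrArg Prod.snd hA
  simp only at e1 e2
  rw [e1, e2]
  simp
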